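-- pv_equiv track=rewrite | github.com/gyeomist23-tech/color-music-mate | services/omr/core/colorize.py | midi_to_degree
-- ===== SOURCE A (Python) =====
-- MAJOR_INTERVALS = [0, 2, 4, 5, 7, 9, 11]
--
-- KEY_ROOT = {
--     "C": 0, "C#": 1, "Db": 1,
--     "D": 2, "D#": 3, "Eb": 3,
--     "E": 4,
--     "F": 5, "F#": 6, "Gb": 6,
--     "G": 7, "G#": 8, "Ab": 8,
--     "A": 9, "A#": 10, "Bb": 10,
--     "B": 11,
-- }
--
-- def midi_to_degree(midi: int, key: str) -> int:
--     """MIDI 번호를 현재 조성의 도수(1~7)로 변환"""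
--     root = KEY_ROOT.get(key, 0)
--     semitone_from_root = (midi - root) % 12
--     # 가장 가까운 스케일 도수 찾기
--     for deg_idx, interval in enumerate(MAJOR_INTERVALS):
--         if semitone_from_root == interval:
--             return deg_idx + 1
--     # 스케일 외 음은 가장 가까운 도수로 근사
--     min_dist = 12
--     best_deg = 1
--     for deg_idx, interval in enumerate(MAJOR_INTERVALS):
--         dist = min(abs(semitone_from_root - interval), 12 - abs(semitone_from_root - interval))
--         if dist < min_dist:
--             min_dist = dist
--             best_deg = deg_idx + 1
--     return best_deg
-- ===== SOURCE B (Python) =====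
-- KEY_ROOT = {
--     "C": 0, "C#": 1, "Db": 1,
--     "D": 2, "D#": 3, "Eb": 3,
--     "E": 4,
--     "F": 5, "F#": 6, "Gb": 6,
--     "G": 7, "G#": 8, "Ab": 8,
--     "A": 9, "A#": 10, "Bb": 10,
--     "B": 11,
-- }
--
-- # degree for each semitone offset 0..11 (nearest major-scale degree, first tie wins)
-- DEGREE_TABLE = [1, 1, 2, 2, 3, 4, 4, 5, 5, 6, 6, 7]
--
-- def midi_to_degree(midi: int, key: str) -> int:
--     return DEGREE_TABLE[(midi - KEY_ROOT.get(key, 0)) % 12]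
-- ===== Notes on version B (the rewrite author's own statement) =====
-- stated objective: simpler
-- what changed: Replaces the exact-match scan plus nearest-interval minimisation loop with a single lookup in a precomputed 12-entry degree table indexed by (midi - root) % 12.
import Mathlib
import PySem

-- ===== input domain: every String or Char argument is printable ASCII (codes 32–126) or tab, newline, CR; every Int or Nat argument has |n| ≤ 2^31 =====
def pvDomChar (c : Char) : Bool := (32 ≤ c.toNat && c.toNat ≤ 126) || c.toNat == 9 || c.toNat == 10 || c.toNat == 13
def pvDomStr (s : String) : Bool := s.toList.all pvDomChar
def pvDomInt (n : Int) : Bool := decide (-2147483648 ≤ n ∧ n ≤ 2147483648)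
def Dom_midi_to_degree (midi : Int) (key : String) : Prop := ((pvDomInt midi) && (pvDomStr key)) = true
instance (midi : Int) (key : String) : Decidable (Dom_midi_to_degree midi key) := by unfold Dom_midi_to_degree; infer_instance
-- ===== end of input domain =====

-- B replaces A's two scans over MAJOR_INTERVALS by one lookup in a precomputed 12-entry degree table (simpler).

-- ===== PORT A =====
def MAJOR_INTERVALS : List Int := [0, 2, 4, 5, 7, 9, 11]

def KEY_ROOT : PySem.Dict String Int := PySem.Dict.ofList
  [("C", 0), ("C#", 1), ("Db", 1),
   ("D", 2), ("D#", 3), ("Eb", 3),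
   ("E", 4),
   ("F", 5), ("F#", 6), ("Gb", 6),
   ("G", 7), ("G#", 8), ("Ab", 8),
   ("A", 9), ("A#", 10), ("Bb", 10),
   ("B", 11)]

-- first loop of A: return deg_idx + 1 on exact interval match
def pvExactScan (s : Int) : List (Int × Int) → Option Int
  | [] => none
  | (i, iv) :: rest => if s = iv then some (i + 1) else pvExactScan s rest

def midi_to_degree (midi : Int) (key : String) : Int :=
  let root := KEY_ROOT.getD key 0
  let semitone_from_root := PySem.Int.mod (midi - root) 12
  match pvExactScan semitone_from_root (PySem.List.enumerate MAJOR_INTERVALS) with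
  | some d => d
  | none =>
    -- second loop: nearest degree by circular distance, first tie wins
    let st := (PySem.List.enumerate MAJOR_INTERVALS).foldl
      (fun (acc : Int × Int) p =>
        let dist := min |semitone_from_root - p.2| (12 - |semitone_from_root - p.2|)
        if dist < acc.1 then (dist, p.1 + 1) else acc)
      (12, 1)
    st.2

-- ===== PORT B =====
def DEGREE_TABLE : List Int := [1, 1, 2, 2, 3, 4, 4, 5, 5, 6, 6, 7]

def midi_to_degree_alt (midi : Int) (key : String) : Int :=
  PySem.List.pyGetD DEGREE_TABLE (PySem.Int.mod (midi - KEY_ROOT.getD key 0) 12) 0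

-- ===== PRECONDITION & SPEC =====
def Spec_midi_to_degree (midi : Int) (key : String) (out : Int) : Prop := out = midi_to_degree_alt midi key
instance (midi : Int) (key : String) (out : Int) : Decidable (Spec_midi_to_degree midi key out) := by unfold Spec_midi_to_degree; infer_instance

-- ===== CLAIM (what is proved, stated in full; the proofs are below) =====
def Claim_equal_midi_to_degree : Prop := ∀ (midi : Int) (key : String), Dom_midi_to_degree midi key → Spec_midi_to_degree midi key (midi_to_degree midi key)

-- ===== LEMMAS AND PROOFS =====

-- the common residue computed by both ports, as a function of the input
def pvResidue (midi : Int) (key : String) : Int :=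
  PySem.Int.mod (midi - KEY_ROOT.getD key 0) 12

-- the two cores agree on every residue 0 ≤ s < 12
def pvACore (s : Int) : Int :=
  match pvExactScan s (PySem.List.enumerate MAJOR_INTERVALS) with
  | some d => d
  | none =>
    let st := (PySem.List.enumerate MAJOR_INTERVALS).foldl
      (fun (acc : Int × Int) p =>
        let dist := min |s - p.2| (12 - |s - p.2|)
        if dist < acc.1 then (dist, p.1 + 1) else acc)
      (12, 1)
    st.2

theorem pvCore_eq (s : Int) (h0 : 0 ≤ s) (h1 : s < 12) :
    pvACore s = PySem.List.pyGetD DEGREE_TABLE s 0 := by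
  interval_cases s <;> decide

theorem pvResidue_bounds (midi : Int) (key : String) :
    0 ≤ pvResidue midi key ∧ pvResidue midi key < 12 := by
  unfold pvResidue
  rw [PySem.Int.mod_eq_emod_of_pos (by norm_num)]
  exact ⟨Int.emod_nonneg _ (by norm_num), Int.emod_lt_of_pos _ (by norm_num)⟩

-- ===== VERDICT (by name: the statement is the Claim_ definition above) =====
theorem midi_to_degree_spec : Claim_equal_midi_to_degree := by
  intro midi key _
  have h := pvResidue_bounds midi key
  have := pvCore_eq (pvResidue midi key) h.1 h.2
  unfold Spec_midi_to_degree midi_to_degree midi_to_degree_alt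
  exact this
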